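-- pv_equiv track=rewrite | github.com/UnderseaEagle1/HelixMelt | tn_calc.py | out_primer
-- ===== SOURCE A (Python) =====
-- def out_primer(primer):
--     nucleotide_dict = {'a':'t', 't':'a', 'g':'c', 'c':'g'}
--
--     filtered_primer = primer.lower().replace(" ", "")
--
--     try:
--         complement_primer = ''.join([nucleotide_dict[char] for char in filtered_primer])
--     except KeyError:
--         return "Error: Primer contains invalid characters (only A, T, G, C allowed)"
--
--     output = (
--         f"3' {filtered_primer.lower()} 5'\n"
--         f"3' {complement_primer[::-1]} 5'"
--         )
--
--     return output
-- ===== SOURCE B (Python) =====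
-- def out_primer(primer):
--     filtered = primer.lower().replace(" ", "")
--     rev_comp = ""
--     for c in filtered:
--         if c == 'a':
--             rev_comp = 't' + rev_comp
--         elif c == 't':
--             rev_comp = 'a' + rev_comp
--         elif c == 'g':
--             rev_comp = 'c' + rev_comp
--         elif c == 'c':
--             rev_comp = 'g' + rev_comp
--         else:
--             return "Error: Primer contains invalid characters (only A, T, G, C allowed)"
--     return f"3' {filtered} 5'\n3' {rev_comp} 5'"
-- ===== Notes on version B (the rewrite author's own statement) =====
-- stated objective: alternative
-- what changed: Replaces A's exception-guarded dict-comprehension join followed by a slice reversal with one fused loop that validates each base and builds the reversed complement back-to-front via an accumulator (no dict, no join, no reverse pass); also drops the redundant second .lower().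
import Mathlib
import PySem

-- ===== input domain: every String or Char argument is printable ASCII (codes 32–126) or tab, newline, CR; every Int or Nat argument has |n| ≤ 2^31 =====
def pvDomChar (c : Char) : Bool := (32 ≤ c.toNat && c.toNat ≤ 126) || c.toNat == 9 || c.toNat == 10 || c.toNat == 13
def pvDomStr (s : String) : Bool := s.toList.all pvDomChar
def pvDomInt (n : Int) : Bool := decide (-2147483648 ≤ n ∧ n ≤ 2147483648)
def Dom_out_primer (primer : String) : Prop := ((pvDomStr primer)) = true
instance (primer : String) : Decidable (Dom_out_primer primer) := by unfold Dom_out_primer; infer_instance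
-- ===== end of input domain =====

-- B replaces A's dict-comprehension + join + slice-reverse with ONE fused loop that
-- validates and builds the reversed complement back-to-front via an accumulator; same cost.

-- ===== PORT A =====
def nucDict : PySem.Dict Char Char :=
  PySem.Dict.ofList [('a', 't'), ('t', 'a'), ('g', 'c'), ('c', 'g')]

-- the list comprehension with dict indexing inside try/except: none = KeyError
def compChars : List Char → Option (List Char)
  | [] => some []
  | c :: cs =>
    match nucDict.get? c with
    | none => none
    | some d => (compChars cs).map (d :: ·)

def out_primer (primer : String) : String :=
  let filtered := PySem.Str.replace (PySem.Str.lower primer) " " ""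
  match compChars filtered.toList with
  | none => "Error: Primer contains invalid characters (only A, T, G, C allowed)"
  | some comp =>
    -- complement_primer[::-1] is the reverse
    "3' " ++ PySem.Str.lower filtered ++ " 5'\n3' " ++ String.ofList comp.reverse ++ " 5'"

-- ===== PORT B =====
-- the for-loop with early return: none = the error return was taken
def bLoop : List Char → List Char → Option (List Char)
  | [], acc => some acc
  | c :: cs, acc =>
    if c = 'a' then bLoop cs ('t' :: acc)
    else if c = 't' then bLoop cs ('a' :: acc)
    else if c = 'g' then bLoop cs ('c' :: acc)
    else if c = 'c' then bLoop cs ('g' :: acc)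
    else none

def out_primer_alt (primer : String) : String :=
  let filtered := PySem.Str.replace (PySem.Str.lower primer) " " ""
  match bLoop filtered.toList [] with
  | none => "Error: Primer contains invalid characters (only A, T, G, C allowed)"
  | some revComp => "3' " ++ filtered ++ " 5'\n3' " ++ String.ofList revComp ++ " 5'"

-- ===== PRECONDITION & SPEC =====
def Spec_out_primer (primer : String) (out : String) : Prop := out = out_primer_alt primer
instance (primer : String) (out : String) : Decidable (Spec_out_primer primer out) := by unfold Spec_out_primer; infer_instance

-- ===== CLAIM (what is proved, stated in full; the proofs are below) =====
def Claim_equal_out_primer : Prop := ∀ (primer : String), Dom_out_primer primer → Spec_out_primer primer (out_primer primer)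

-- ===== LEMMAS AND PROOFS =====

theorem nucDict_eq :
    nucDict = PySem.Dict.mk [('a', 't'), ('t', 'a'), ('g', 'c'), ('c', 'g')] := by decide

theorem nucDict_get (c : Char) :
    nucDict.get? c =
      if c = 'a' then some 't' else if c = 't' then some 'a'
      else if c = 'g' then some 'c' else if c = 'c' then some 'g' else none := by
  by_cases h1 : c = 'a'
  · subst h1; decide
  by_cases h2 : c = 't'
  · subst h2; decide
  by_cases h3 : c = 'g'
  · subst h3; decide
  by_cases h4 : c = 'c'
  · subst h4; decide
  rw [nucDict_eq]
  simp [PySem.Dict.get?, beq_iff_eq,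
    h1, h2, h3, h4, Ne.symm h1, Ne.symm h2, Ne.symm h3, Ne.symm h4]

-- B's accumulator loop computes the reverse of A's comprehension result
theorem bLoop_eq_compChars (l : List Char) (acc : List Char) :
    bLoop l acc = (compChars l).map (fun comp => comp.reverse ++ acc) := by
  induction l generalizing acc with
  | nil => simp [bLoop, compChars]
  | cons c cs ih =>
    simp only [bLoop, compChars, nucDict_get]
    by_cases h1 : c = 'a'
    · simp [h1, ih, Option.map_map, Function.comp_def]
    by_cases h2 : c = 't'
    · simp [h2, ih, Option.map_map, Function.comp_def]
    by_cases h3 : c = 'g'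
    · simp [h3, ih, Option.map_map, Function.comp_def]
    by_cases h4 : c = 'c'
    · simp [h4, ih, Option.map_map, Function.comp_def]
    simp [h1, h2, h3, h4]

theorem compChars_valid (l : List Char) (comp : List Char) (h : compChars l = some comp) :
    ∀ c ∈ l, c = 'a' ∨ c = 't' ∨ c = 'g' ∨ c = 'c' := by
  induction l generalizing comp with
  | nil => simp
  | cons c cs ih =>
    intro x hx
    cases hx with
    | head =>
      by_cases h1 : c = 'a'
      · exact Or.inl h1
      by_cases h2 : c = 't'
      · exact Or.inr (Or.inl h2)
      by_cases h3 : c = 'g'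
      · exact Or.inr (Or.inr (Or.inl h3))
      by_cases h4 : c = 'c'
      · exact Or.inr (Or.inr (Or.inr h4))
      exfalso
      simp [compChars, nucDict_get, h1, h2, h3, h4] at h
    | tail _ hx =>
      obtain ⟨comp', hc⟩ : ∃ comp', compChars cs = some comp' := by
        cases hcs : compChars cs with
        | none =>
          exfalso
          cases hg : nucDict.get? c <;> simp [compChars, hg, hcs] at h
        | some comp' => exact ⟨comp', rfl⟩
      exact ih comp' hc x hx

theorem lower_fixed_of_valid (l : List Char)
    (h : ∀ c ∈ l, c = 'a' ∨ c = 't' ∨ c = 'g' ∨ c = 'c') :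
    PySem.Chars.lower l = l := by
  induction l with
  | nil => rfl
  | cons c cs ih =>
    have hcs : PySem.Chars.lower cs = cs := ih (fun x hx => h x (by simp [hx]))
    rcases h c (by simp) with h' | h' | h' | h' <;> subst h' <;>
      simp [PySem.Chars.lower, PySem.Chars.lowerChar] at hcs ⊢ <;>
      exact ⟨by decide, hcs⟩

theorem str_lower_fixed (s : String)
    (h : ∀ c ∈ s.toList, c = 'a' ∨ c = 't' ∨ c = 'g' ∨ c = 'c') :
    PySem.Str.lower s = s := by
  apply String.toList_inj.mp
  simpa using lower_fixed_of_valid s.toList h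

-- ===== VERDICT (by name: the statement is the Claim_ definition above) =====
theorem out_primer_spec : Claim_equal_out_primer := by
  intro primer _
  unfold Spec_out_primer out_primer out_primer_alt
  simp only [bLoop_eq_compChars]
  cases hcc : compChars (PySem.Str.replace (PySem.Str.lower primer) " " "").toList with
  | none => simp
  | some comp =>
    simp only [Option.map_some]
    rw [str_lower_fixed _ (compChars_valid _ _ hcc)]
    simp
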